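-- pv_equiv track=rewrite | github.com/RenukaUnnam/Python-OS- | BusyPrinter.py | calculate_total_time
-- ===== SOURCE A (Python) =====
-- def calculate_total_time(arrival_times, pages):
--     current_time = 0
--     total_time = 0
--     for i in range(len(arrival_times)):
--         if current_time < arrival_times[i]:
--             current_time = arrival_times[i]
--         current_time += pages[i]
--     return current_time
-- ===== SOURCE B (Python) =====
-- def calculate_total_time(arrival_times, pages):
--     # Backward pass: suffix sum of pages plus max of arrival+suffix,
--     # instead of A's forward running-time simulation.
--     suffix = 0
--     best = None
--     for i in range(len(arrival_times) - 1, -1, -1):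
--         suffix += pages[i]
--         cand = arrival_times[i] + suffix
--         best = cand if best is None else max(best, cand)
--     return suffix if best is None else max(best, suffix)
-- ===== Notes on version B (the rewrite author's own statement) =====
-- stated objective: alternative
-- what changed: Replaces A's forward simulation of the printer's running clock with a single backward pass that accumulates suffix sums of pages and takes the max of arrival_time + suffix (and the total page sum), exploiting finish = max_k(arrival[k] + pages[k:]) joined with the never-idle total.
import Mathlib
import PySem

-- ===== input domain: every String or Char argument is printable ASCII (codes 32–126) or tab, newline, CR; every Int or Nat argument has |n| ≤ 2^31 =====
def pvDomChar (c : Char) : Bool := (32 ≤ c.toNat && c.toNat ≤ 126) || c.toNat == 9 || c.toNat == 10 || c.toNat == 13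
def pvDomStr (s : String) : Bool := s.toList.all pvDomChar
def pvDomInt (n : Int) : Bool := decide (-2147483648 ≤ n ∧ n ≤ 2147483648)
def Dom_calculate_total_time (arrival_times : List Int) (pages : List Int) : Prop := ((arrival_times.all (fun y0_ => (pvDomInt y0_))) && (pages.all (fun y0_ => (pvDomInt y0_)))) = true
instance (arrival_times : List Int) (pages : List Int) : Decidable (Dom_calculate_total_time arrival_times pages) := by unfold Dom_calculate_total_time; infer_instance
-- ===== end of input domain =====

-- B replaces A's forward running-clock simulation by a backward suffix-sum pass with a max reduction (alternative decomposition, same cost; return-value equivalence, no mutation involved).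


-- ===== PORT A =====
-- for i in range(len(arrival_times)): if current_time < arrival_times[i]: …; current_time += pages[i]
-- Indexing is via getD 0; exact because Pre_ guarantees every accessed index is in range.
def calculate_total_time (arrival_times : List Int) (pages : List Int) : Int :=
  (List.range arrival_times.length).foldl
    (fun current_time i =>
      let current_time :=
        if current_time < arrival_times.getD i 0 then arrival_times.getD i 0 else current_time
      current_time + pages.getD i 0)
    0

-- ===== PORT B =====
-- for i in range(n-1, -1, -1): suffix += pages[i]; cand = arrival_times[i] + suffix; best = max…
-- state (suffix, best : Option Int); best is None before the first iteration, as in Source B.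
def calculate_total_time_alt (arrival_times : List Int) (pages : List Int) : Int :=
  let st :=
    ((List.range arrival_times.length).reverse).foldl
      (fun (st : Int × Option Int) i =>
        let suffix := st.1 + pages.getD i 0
        let cand := arrival_times.getD i 0 + suffix
        (suffix, some (match st.2 with | none => cand | some b => max b cand)))
      (0, none)
  match st.2 with
  | none => st.1
  | some b => max b st.1

-- ===== PRECONDITION & SPEC =====
-- A raises IndexError (pages[i]) when pages is shorter than arrival_times; exactly those inputs are excluded (B raises there too).
def Pre_calculate_total_time (arrival_times : List Int) (pages : List Int) : Prop :=
  arrival_times.length ≤ pages.length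
instance (arrival_times : List Int) (pages : List Int) : Decidable (Pre_calculate_total_time arrival_times pages) := by unfold Pre_calculate_total_time; infer_instance
def pvWitness_calculate_total_time : List Int × List Int := ([2, 3, 7], [5, 1, 2])

def Spec_calculate_total_time (arrival_times : List Int) (pages : List Int) (out : Int) : Prop := out = calculate_total_time_alt arrival_times pages
instance (arrival_times : List Int) (pages : List Int) (out : Int) : Decidable (Spec_calculate_total_time arrival_times pages out) := by unfold Spec_calculate_total_time; infer_instance

-- ===== CLAIM (what is proved, stated in full; the proofs are below) =====
def Claim_equal_calculate_total_time : Prop := ∀ (arrival_times : List Int) (pages : List Int), Dom_calculate_total_time arrival_times pages → Pre_calculate_total_time arrival_times pages → Spec_calculate_total_time arrival_times pages (calculate_total_time arrival_times pages)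

-- ===== LEMMAS AND PROOFS =====

-- Reference recursion for A's forward loop (accumulator = current_time).
def runA (c : Int) : List Int → List Int → Int
  | [], _ => c
  | _ :: _, [] => c
  | a :: as, p :: ps => runA ((if c < a then a else c) + p) as ps

-- Reference recursion for B's backward pass: (suffix sum, best candidate).
def backB : List Int → List Int → Int × Option Int
  | [], _ => (0, none)
  | _ :: _, [] => (0, none)
  | a :: as, p :: ps =>
      let st := backB as ps
      let s := st.1 + p
      let c := a + s
      (s, some (match st.2 with | none => c | some b => max b c))

theorem foldA_eq_runA (as ps : List Int) (c : Int) (h : as.length ≤ ps.length) :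
    (List.range as.length).foldl
      (fun current_time i =>
        let current_time :=
          if current_time < as.getD i 0 then as.getD i 0 else current_time
        current_time + ps.getD i 0) c = runA c as ps := by
  induction as generalizing ps c with
  | nil => simp [runA]
  | cons a as ih =>
    cases ps with
    | nil => simp at h
    | cons p ps =>
      simp only [List.length_cons, List.range_succ_eq_map, List.foldl_cons, List.foldl_map,
        List.getD_cons_succ, List.getD_cons_zero]
      exact ih ps _ (by simpa using h)

theorem foldB_eq_backB (as ps : List Int) (h : as.length ≤ ps.length) :
    ((List.range as.length).reverse).foldl
      (fun (st : Int × Option Int) i =>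
        let suffix := st.1 + ps.getD i 0
        let cand := as.getD i 0 + suffix
        (suffix, some (match st.2 with | none => cand | some b => max b cand)))
      (0, none) = backB as ps := by
  induction as generalizing ps with
  | nil => simp [backB]
  | cons a as ih =>
    cases ps with
    | nil => simp at h
    | cons p ps =>
      simp only [List.length_cons, List.range_succ_eq_map, List.reverse_cons,
        List.map_reverse.symm, List.foldl_append, List.foldl_map, List.foldl_cons,
        List.getD_cons_succ, List.getD_cons_zero, List.foldl_nil]
      rw [ih ps (by simpa using h)]
      simp [backB]

theorem runA_eq_backB (as ps : List Int) (c : Int) (h : as.length ≤ ps.length) :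
    runA c as ps =
      (match (backB as ps).2 with
       | none => c + (backB as ps).1
       | some b => max (c + (backB as ps).1) b) := by
  induction as generalizing ps c with
  | nil => simp [runA, backB]
  | cons a as ih =>
    cases ps with
    | nil => simp at h
    | cons p ps =>
      rw [show runA c (a :: as) (p :: ps) = runA ((if c < a then a else c) + p) as ps from rfl]
      rw [ih ps _ (by simpa using h)]
      rcases hB : backB as ps with ⟨s, ob⟩
      simp only [backB, hB]
      rcases ob with _ | b <;> simp only [max_def] <;> split_ifs <;> linarith

-- ===== VERDICT (by name: the statement is the Claim_ definition above) =====
theorem calculate_total_time_spec : Claim_equal_calculate_total_time := by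
  intro as ps _ hpre
  unfold Spec_calculate_total_time calculate_total_time calculate_total_time_alt
  rw [foldA_eq_runA as ps 0 hpre, runA_eq_backB as ps 0 hpre, foldB_eq_backB as ps hpre]
  rcases hb : (backB as ps).2 with _ | b <;> simp [hb, max_comm]
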